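-- pv_equiv track=rewrite | github.com/sagemath/sage-archive-2023-02-01 | src/sage/groups/cubic_braid.py | _reduce_tietze
-- ===== SOURCE A (Python) =====
-- def _reduce_tietze(tietze_list):
--     r"""
--     Reduce the length of a list representing a cubic braid as much as it is
--     easily possible using the second braid relation and degree reduction.
--
--     EXAMPLES::
--
--         sage: from sage.groups.cubic_braid import _reduce_tietze
--         sage: _reduce_tietze((2, 2, -3, 5, 3, 1, 1, 5))
--         [-2, -5, -1]
--     """
--     def eliminate_item(tietze_list):
--         """
--         this sub method searches for an item in the Tietze expression such
--         that it together with the first entry gives a pair which can be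
--         replaced by the second braid relation and the generators degree
--         reduction. If no such pair exists, it returns None. Else-wise the
--         reduced tietze list is returned.
--         """
--         l = len(tietze_list)
--         if l < 2:
--             return None
--         first = tietze_list[0]
--         second = None
--         for i in range(1,l):
--             if tietze_list[i] in (first, -first):
--                 if i == 1:
--                     second = tietze_list[i]
--                     break
--                 if all(abs(abs(tietze_list[j])-abs(first)) > 1 for j in range(1, i)):
--                     # the entry on position i can be moved right to the first entry
--                     # by the second braid relation
--                     second = tietze_list[i]
--                     break
--         if second is None:
--             return None
--         middle = tietze_list[1:i]
--         end    = tietze_list[i+1:l]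
--         if first == second:
--             return [-first] + middle + end
--         else:
--             return middle + end
--
--     tietze_list = list(tietze_list)
--     l = len(tietze_list)
--     for i in range(l):
--         end = tietze_list[i:l]
--         tietze_list_red = eliminate_item(end)
--         if tietze_list_red is not None:
--             start = tietze_list[:i]
--             return start + _reduce_tietze(tietze_list_red)
--     return tietze_list
-- ===== SOURCE B (Python) =====
-- def _reduce_tietze(tietze_list):
--     # Iterative driver (result/work lists) + one-pass eliminate with early blocking stop.
--     def eliminate(word):
--         # The first entry whose absolute value is within 1 of |first| either
--         # matches +-first (so it can be moved next to first and reduced) or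
--         # blocks every later candidate; one scan decides.
--         if len(word) < 2:
--             return None
--         first = word[0]
--         for i in range(1, len(word)):
--             if word[i] == first:
--                 return [-first] + word[1:i] + word[i + 1:]
--             if word[i] == -first:
--                 return word[1:i] + word[i + 1:]
--             if abs(abs(word[i]) - abs(first)) <= 1:
--                 return None
--         return None
--
--     result = []
--     work = list(tietze_list)
--     while True:
--         for i in range(len(work)):
--             red = eliminate(work[i:])
--             if red is not None:
--                 result += work[:i]
--                 work = red
--                 break
--         else:
--             return result + work
-- ===== Notes on version B (the rewrite author's own statement) =====
-- stated objective: alternative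
-- what changed: eliminate_item's candidate search (which re-checks movability over all intermediate entries for every matching candidate) becomes a single forward scan that stops at the first entry within 1 of |first| (a match reduces, anything else blocks all later candidates), and the recursive driver becomes an iterative result/work accumulator loop.
import Mathlib
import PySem

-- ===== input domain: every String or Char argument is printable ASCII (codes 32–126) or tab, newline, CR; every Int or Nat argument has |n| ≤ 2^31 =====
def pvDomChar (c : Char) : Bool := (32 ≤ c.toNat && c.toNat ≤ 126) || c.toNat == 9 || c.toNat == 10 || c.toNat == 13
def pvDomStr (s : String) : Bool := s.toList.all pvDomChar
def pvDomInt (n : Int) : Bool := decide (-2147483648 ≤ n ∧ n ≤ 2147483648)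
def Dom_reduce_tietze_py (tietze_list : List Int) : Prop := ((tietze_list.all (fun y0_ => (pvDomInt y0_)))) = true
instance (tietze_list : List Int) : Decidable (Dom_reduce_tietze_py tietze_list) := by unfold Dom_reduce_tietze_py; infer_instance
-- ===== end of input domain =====

-- B replaces A's recursive driver by an iterative result/work accumulator loop and A's
-- re-checking candidate search in eliminate_item by a single forward scan that stops at the
-- first entry within 1 of |first| (a match reduces, anything else blocks all later candidates).
-- (The fuel parameters below only make the recursions structural; fuel never runs out.)

-- ===== PORT A =====
-- abs(abs(x) - abs(f)) > 1   (Python abs on int is Int.natAbs; exact)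
def pvMovA (x f : Int) : Bool := decide (1 < (((x.natAbs : Int) - (f.natAbs : Int)).natAbs))

-- the `for i in range(1, l)` search loop of eliminate_item; returns (i, second).
-- indices are in range, so tietze_list[i] is tl.getD i 0 (exact here); fuel ≥ l - i.
def pvFindA (tl : List Int) (f : Int) (l : Nat) : Nat → Nat → Option (Nat × Int)
  | _, 0 => none
  | i, fuel + 1 =>
    if i < l then
      if tl.getD i 0 = f ∨ tl.getD i 0 = -f then
        if i = 1 then some (i, tl.getD i 0)
        else if (List.range' 1 (i - 1)).all (fun j => pvMovA (tl.getD j 0) f) then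
          some (i, tl.getD i 0)
        else pvFindA tl f l (i + 1) fuel
      else pvFindA tl f l (i + 1) fuel
    else none

-- eliminate_item; tl[1:i] = (tl.take i).drop 1 and tl[i+1:l] = tl.drop (i+1) (in-range slices, exact)
def pvElimA (tl : List Int) : Option (List Int) :=
  let l := tl.length
  if l < 2 then none
  else
    let first := tl.getD 0 0
    match pvFindA tl first l 1 l with
    | none => none
    | some (i, second) =>
      let middle := (tl.take i).drop 1
      let endp := tl.drop (i + 1)
      if first = second then some ((-first) :: (middle ++ endp)) else some (middle ++ endp)

-- the driver's `for i in range(l)` loop: first i whose suffix reduces; fuel ≥ l - i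
def pvLoopA (tl : List Int) (l : Nat) : Nat → Nat → Option (Nat × List Int)
  | _, 0 => none
  | i, fuel + 1 =>
    if i < l then
      match pvElimA (tl.drop i) with
      | some red => some (i, red)
      | none => pvLoopA tl l (i + 1) fuel
    else none

-- the recursive driver; each round removes ≥ 1 element, so fuel = length + 1 never runs out
def pvRedA : Nat → List Int → List Int
  | 0, tl => tl
  | fuel + 1, tl =>
    match pvLoopA tl tl.length 0 tl.length with
    | some (i, red) => tl.take i ++ pvRedA fuel red
    | none => tl

def reduce_tietze_py (tietze_list : List Int) : List Int :=
  pvRedA (tietze_list.length + 1) tietze_list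

-- ===== PORT B =====
-- one-pass scan of B's eliminate: a match reduces, a near miss (|Δabs| ≤ 1) gives up; fuel ≥ l - i
def pvFindB (tl : List Int) (f : Int) (l : Nat) : Nat → Nat → Option (List Int)
  | _, 0 => none
  | i, fuel + 1 =>
    if i < l then
      if tl.getD i 0 = f then some ((-f) :: ((tl.take i).drop 1 ++ tl.drop (i + 1)))
      else if tl.getD i 0 = -f then some ((tl.take i).drop 1 ++ tl.drop (i + 1))
      else if ((((tl.getD i 0).natAbs : Int) - (f.natAbs : Int)).natAbs) ≤ 1 then none
      else pvFindB tl f l (i + 1) fuel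
    else none

def pvElimB (tl : List Int) : Option (List Int) :=
  if tl.length < 2 then none
  else pvFindB tl (tl.getD 0 0) tl.length 1 tl.length

-- the inner `for i in range(len(work))` scan of B's driver; fuel ≥ l - i
def pvLoopB (tl : List Int) (l : Nat) : Nat → Nat → Option (Nat × List Int)
  | _, 0 => none
  | i, fuel + 1 =>
    if i < l then
      match pvElimB (tl.drop i) with
      | some red => some (i, red)
      | none => pvLoopB tl l (i + 1) fuel
    else none

-- B's while-loop with the accumulated prefix `result`; fuel = length + 1 never runs out
def pvGoB : Nat → List Int → List Int → List Int
  | 0, result, work => result ++ work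
  | fuel + 1, result, work =>
    match pvLoopB work work.length 0 work.length with
    | some (i, red) => pvGoB fuel (result ++ work.take i) red
    | none => result ++ work

def reduce_tietze_py_alt (tietze_list : List Int) : List Int :=
  pvGoB (tietze_list.length + 1) [] tietze_list

-- ===== PRECONDITION & SPEC =====
def Spec_reduce_tietze_py (tietze_list : List Int) (out : List Int) : Prop := out = reduce_tietze_py_alt tietze_list
instance (tietze_list : List Int) (out : List Int) : Decidable (Spec_reduce_tietze_py tietze_list out) := by unfold Spec_reduce_tietze_py; infer_instance

-- ===== CLAIM (what is proved, stated in full; the proofs are below) =====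
def Claim_equal_reduce_tietze_py : Prop := ∀ (tietze_list : List Int), Dom_reduce_tietze_py tietze_list → Spec_reduce_tietze_py tietze_list (reduce_tietze_py tietze_list)

-- ===== LEMMAS AND PROOFS =====

lemma pvFindA_hit {tl : List Int} {f : Int} {l i fuel : Nat} (h : i < l)
    (hor : tl.getD i 0 = f ∨ tl.getD i 0 = -f)
    (hall : ((List.range' 1 (i - 1)).all fun j => pvMovA (tl.getD j 0) f) = true) :
    pvFindA tl f l i (fuel + 1) = some (i, tl.getD i 0) := by
  rw [pvFindA, if_pos h, if_pos hor]
  by_cases h1 : i = 1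
  · simp [h1]
  · rw [if_neg h1, if_pos hall]

lemma pvFindA_miss {tl : List Int} {f : Int} {l i fuel : Nat} (h : i < l)
    (hnor : ¬ (tl.getD i 0 = f ∨ tl.getD i 0 = -f)) :
    pvFindA tl f l i (fuel + 1) = pvFindA tl f l (i + 1) fuel := by
  rw [pvFindA, if_pos h, if_neg hnor]

-- once some position j with |Δabs| ≤ 1 has been passed, A's search can never succeed again
lemma pvFindA_blocked {tl : List Int} {f : Int} {l : Nat} (fuel : Nat) :
    ∀ i j, 1 ≤ j → j < i → pvMovA (tl.getD j 0) f = false → pvFindA tl f l i fuel = none := by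
  induction fuel with
  | zero => intro i j _ _ _; rfl
  | succ fuel ih =>
    intro i j hj1 hj2 hj3
    rw [pvFindA]
    by_cases h : i < l
    · rw [if_pos h]
      by_cases hor : tl.getD i 0 = f ∨ tl.getD i 0 = -f
      · rw [if_pos hor]
        have h1 : ¬ i = 1 := by omega
        rw [if_neg h1]
        have hall : ¬ ((List.range' 1 (i - 1)).all fun j => pvMovA (tl.getD j 0) f) = true := by
          intro hc
          have hm : j ∈ List.range' 1 (i - 1) := List.mem_range'.mpr ⟨j - 1, by omega, by omega⟩
          have := (List.all_eq_true.mp hc) j hm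
          simp_all
        rw [if_neg hall]
        exact ih (i + 1) j hj1 (by omega) hj3
      · rw [if_neg hor]
        exact ih (i + 1) j hj1 (by omega) hj3
    · rw [if_neg h]

-- while every previous entry is movable, A's search and B's single scan agree
lemma pvFind_agree {tl : List Int} {f : Int} {l : Nat} (fuel : Nat) :
    ∀ i, 1 ≤ i → (∀ j, 1 ≤ j → j < i → pvMovA (tl.getD j 0) f = true) →
    pvFindB tl f l i fuel =
      (pvFindA tl f l i fuel).map (fun p =>
        if f = p.2 then (-f) :: ((tl.take p.1).drop 1 ++ tl.drop (p.1 + 1))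
        else (tl.take p.1).drop 1 ++ tl.drop (p.1 + 1)) := by
  induction fuel with
  | zero => intro i _ _; rfl
  | succ fuel ih =>
    intro i hi hall
    have hall' : ((List.range' 1 (i - 1)).all fun j => pvMovA (tl.getD j 0) f) = true := by
      simp only [List.all_eq_true]
      intro j hj
      obtain ⟨k, hk1, hk2⟩ := List.mem_range'.mp hj
      exact hall j (by omega) (by omega)
    rw [pvFindB]
    by_cases h : i < l
    · rw [if_pos h]
      by_cases hx : tl.getD i 0 = f
      · rw [if_pos hx, pvFindA_hit h (Or.inl hx) hall']
        simp only [Option.map_some]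
        rw [hx]
        simp
      · rw [if_neg hx]
        by_cases hx2 : tl.getD i 0 = -f
        · have hne : ¬ f = -f := fun hc => hx (by rw [hx2, ← hc])
          rw [if_pos hx2, pvFindA_hit h (Or.inr hx2) hall']
          simp only [Option.map_some]
          rw [hx2, if_neg hne]
        · have hnor : ¬ (tl.getD i 0 = f ∨ tl.getD i 0 = -f) := by
            intro hc; rcases hc with hc | hc; exact hx hc; exact hx2 hc
          rw [if_neg hx2]
          by_cases hb : (((tl.getD i 0).natAbs : Int) - (f.natAbs : Int)).natAbs ≤ 1
          · rw [if_pos hb, pvFindA_miss h hnor]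
            have hbf : pvMovA (tl.getD i 0) f = false := by
              simp only [pvMovA, decide_eq_false_iff_not]; omega
            rw [pvFindA_blocked fuel (i + 1) i hi (by omega) hbf]
            rfl
          · rw [if_neg hb, pvFindA_miss h hnor]
            apply ih (i + 1) (by omega)
            intro j hj1 hj2
            by_cases hji : j = i
            · subst hji; simp only [pvMovA, decide_eq_true_eq]; omega
            · exact hall j hj1 (by omega)
    · rw [if_neg h, pvFindA, if_neg h]; rfl

lemma pvElim_agree (tl : List Int) : pvElimB tl = pvElimA tl := by
  unfold pvElimA pvElimB
  by_cases hl : tl.length < 2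
  · simp [hl]
  · simp only [hl, if_false]
    rw [pvFind_agree tl.length 1 le_rfl (by intro j hj1 hj2; omega)]
    rcases pvFindA tl (tl.getD 0 0) tl.length 1 tl.length with _ | ⟨i, s⟩
    · rfl
    · simp only [Option.map_some]
      exact apply_ite some _ _ _

lemma pvLoop_agree (tl : List Int) (l : Nat) (fuel : Nat) :
    ∀ i, pvLoopB tl l i fuel = pvLoopA tl l i fuel := by
  induction fuel with
  | zero => intro i; rfl
  | succ fuel ih =>
    intro i
    rw [pvLoopB, pvLoopA, pvElim_agree]
    by_cases h : i < l
    · rw [if_pos h, if_pos h]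
      rcases pvElimA (tl.drop i) with _ | red
      · exact ih (i + 1)
      · rfl
    · rw [if_neg h, if_neg h]

-- B's accumulator loop computes the accumulated prefix ++ A's recursion, fuel for fuel
lemma pvGoB_eq (fuel : Nat) :
    ∀ result work, pvGoB fuel result work = result ++ pvRedA fuel work := by
  induction fuel with
  | zero => intro result work; rfl
  | succ fuel ih =>
    intro result work
    rw [pvGoB, pvRedA, pvLoop_agree work work.length work.length 0]
    rcases pvLoopA work work.length 0 work.length with _ | ⟨i, red⟩
    · rfl
    · simp only []
      rw [ih, List.append_assoc]

-- ===== VERDICT (by name: the statement is the Claim_ definition above) =====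
theorem reduce_tietze_py_spec : Claim_equal_reduce_tietze_py := by
  intro tl _
  unfold Spec_reduce_tietze_py reduce_tietze_py_alt reduce_tietze_py
  rw [pvGoB_eq]
  simp
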